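-- pv_equiv track=rewrite | github.com/atviriduomenys/katalogas | scripts/upload_data_to_storage.py | handle_error
-- ===== SOURCE A (Python) =====
-- def handle_error(stderr):
--     lines = stderr.splitlines()
--     start = next((i for i, line in enumerate(lines) if line.startswith('Traceback')), None)
--     if start is not None:
--         end = next((i for i, line in enumerate(lines[start:], start) if not line.startswith(' ')
--                     and not line.startswith('Traceback')), None)
--         if end is not None and end != start:
--             return lines[end]
-- ===== SOURCE B (Python) =====
-- def handle_error(stderr):
--     seen_traceback = False
--     for line in stderr.splitlines():
--         if line.startswith('Traceback'):
--             seen_traceback = True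
--         elif seen_traceback and not line.startswith(' '):
--             return line
--     return None
-- ===== Notes on version B (the rewrite author's own statement) =====
-- stated objective: simpler
-- what changed: Replaced the two sequential next()/enumerate index scans (and the vestigial end != start check and lines[end] re-indexing) by one state-machine pass over the lines with a seen_traceback flag that returns the line directly.
import Mathlib
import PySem

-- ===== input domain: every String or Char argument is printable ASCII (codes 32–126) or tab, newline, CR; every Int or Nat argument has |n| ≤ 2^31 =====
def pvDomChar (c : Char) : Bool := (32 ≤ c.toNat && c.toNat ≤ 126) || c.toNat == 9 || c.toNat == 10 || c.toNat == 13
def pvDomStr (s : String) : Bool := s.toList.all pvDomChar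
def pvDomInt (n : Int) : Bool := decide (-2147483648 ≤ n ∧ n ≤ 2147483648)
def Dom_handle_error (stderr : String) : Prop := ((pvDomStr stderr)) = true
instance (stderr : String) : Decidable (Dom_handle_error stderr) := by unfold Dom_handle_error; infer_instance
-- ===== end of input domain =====

-- B replaces A's two sequential next()/enumerate index scans by a single pass carrying a seen_traceback flag (simpler decomposition, same return value).

-- ===== PORT A =====
-- A-side helper: the body of A after 'lines = stderr.splitlines()'
def handleErrorCore (lines : List String) : Option String :=
  match (PySem.List.enumerate lines 0).find? (fun p => PySem.Str.startswith p.2 "Traceback") with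
  | none => none
  | some (start, _) =>
    match (PySem.List.enumerate (PySem.List.slice lines (some start) none) start).find?
        (fun p => !PySem.Str.startswith p.2 " " && !PySem.Str.startswith p.2 "Traceback") with
    | none => none
    | some (e, _) => if e ≠ start then PySem.List.pyGet? lines e else none


def handle_error (stderr : String) : Option String :=
  handleErrorCore (PySem.Str.splitlines stderr)

-- ===== PORT B =====
-- B-side helper: the for-loop carrying the seen_traceback flag
def handleErrorLoop : List String → Bool → Option String
  | [], _ => none
  | l :: ls, seen =>
    if PySem.Str.startswith l "Traceback" then handleErrorLoop ls true
    else if seen && !PySem.Str.startswith l " " then some l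
    else handleErrorLoop ls seen


def handle_error_alt (stderr : String) : Option String :=
  handleErrorLoop (PySem.Str.splitlines stderr) false

-- ===== PRECONDITION & SPEC =====
def Spec_handle_error (stderr : String) (out : Option String) : Prop := out = handle_error_alt stderr
instance (stderr : String) (out : Option String) : Decidable (Spec_handle_error stderr out) := by unfold Spec_handle_error; infer_instance

-- ===== CLAIM (what is proved, stated in full; the proofs are below) =====
def Claim_equal_handle_error : Prop := ∀ (stderr : String), Dom_handle_error stderr → Spec_handle_error stderr (handle_error stderr)

-- ===== LEMMAS AND PROOFS =====

theorem enum_find?_shift {α : Type} (c : Int × α → Bool) (ls : List α) (s : Int)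
    (hc : ∀ i j x, c (i, x) = c (j, x)) :
    (PySem.List.enumerate ls (s + 1)).find? c
      = ((PySem.List.enumerate ls s).find? c).map (fun p => (p.1 + 1, p.2)) := by
  induction ls generalizing s with
  | nil => simp [PySem.List.enumerate_nil]
  | cons x xs ih =>
    simp only [PySem.List.enumerate_cons, List.find?_cons]
    by_cases h : c (s, x) = true
    · rw [hc (s+1) s x]; simp [h]
    · rw [hc (s+1) s x]
      simp only [h]
      simpa using ih (s + 1)

theorem enum_find?_snd {α : Type} (c : Int × α → Bool) (ls : List α) (s : Int)
    (hc : ∀ i j x, c (i, x) = c (j, x)) :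
    ((PySem.List.enumerate ls s).find? c).map (·.2) = ls.find? (fun x => c (s, x)) := by
  induction ls generalizing s with
  | nil => simp [PySem.List.enumerate_nil]
  | cons x xs ih =>
    simp only [PySem.List.enumerate_cons, List.find?_cons]
    by_cases h : c (s, x) = true
    · simp [h]
    · simp only [h]
      rw [ih (s+1), show (fun x => c (s+1, x)) = (fun x => c (s, x)) from funext fun y => hc (s+1) s y]

theorem enum_find?_mem {α : Type} {c : Int × α → Bool} {ls : List α} {s : Int} {p : Int × α}
    (h : (PySem.List.enumerate ls s).find? c = some p) :
    ∃ (k : Nat), p.1 = s + k ∧ ls[k]? = some p.2 := by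
  have hm := List.mem_of_find?_eq_some h
  rw [PySem.List.mem_enumerate_iff] at hm
  obtain ⟨k, hk, rfl⟩ := hm
  exact ⟨k, rfl, by simp [hk]⟩

theorem loop_true_eq_find? (ls : List String) :
    handleErrorLoop ls true
      = ls.find? (fun l => !PySem.Str.startswith l " " && !PySem.Str.startswith l "Traceback") := by
  induction ls with
  | nil => rfl
  | cons l ls ih =>
    simp only [handleErrorLoop, List.find?_cons]
    by_cases hT : PySem.Str.startswith l "Traceback" = true
    · simp only [hT, if_true, Bool.not_true, Bool.and_false]
      exact ih
    · have hT' : PySem.Str.startswith l "Traceback" = false := by simpa using hT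
      simp only [hT', Bool.false_eq_true, if_false, Bool.not_false, Bool.and_true, Bool.true_and]
      by_cases hS : PySem.Str.startswith l " " = true
      · simp only [hS, Bool.not_true, if_false, Bool.false_eq_true]
        exact ih
      · have hS' : PySem.Str.startswith l " " = false := by simpa using hS
        simp only [hS', Bool.not_false, if_true]

theorem core_eq_loop (ls : List String) : handleErrorCore ls = handleErrorLoop ls false := by
  induction ls with
  | nil => rfl
  | cons l ls ih =>
    by_cases hT : PySem.Str.startswith l "Traceback" = true
    · -- first line opens the traceback: start = 0, end != start always holds
      have hloop : handleErrorLoop (l :: ls) false = handleErrorLoop ls true := by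
        simp only [handleErrorLoop, hT, if_true]
      rw [hloop, loop_true_eq_find?]
      simp only [handleErrorCore, PySem.List.enumerate_cons, List.find?_cons, hT,
        PySem.List.slice_zero_start, PySem.List.slice_none_none, Bool.not_true, Bool.and_false]
      rw [enum_find?_shift
        (fun p => !PySem.Str.startswith p.2 " " && !PySem.Str.startswith p.2 "Traceback")
        ls 0 (fun _ _ _ => rfl)]
      have h2 := enum_find?_snd
        (fun p => !PySem.Str.startswith p.2 " " && !PySem.Str.startswith p.2 "Traceback")
        ls 0 (fun _ _ _ => rfl)
      rcases hfind : (PySem.List.enumerate ls 0).find?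
          (fun p => !PySem.Str.startswith p.2 " " && !PySem.Str.startswith p.2 "Traceback")
          with _ | ⟨e, v⟩
      · rw [hfind] at h2
        rw [hfind]
        simp only [Option.map_none] at h2 ⊢
        exact h2
      · obtain ⟨k, hk1, hk2⟩ := enum_find?_mem hfind
        simp only at hk1 hk2
        rw [hfind] at h2
        rw [hfind]
        simp only [Option.map_some] at h2 ⊢
        rw [← h2]
        have hne : e + 1 ≠ 0 := by omega
        rw [if_pos hne]
        rw [hk1, show (0 : Int) + (k : Int) + 1 = ((k + 1 : Nat) : Int) by push_cast; ring]
        simp [hk2]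
    · -- first line does not open a traceback: A(l :: ls) = A(ls)
      have hT' : PySem.Str.startswith l "Traceback" = false := by simpa using hT
      have hloop : handleErrorLoop (l :: ls) false = handleErrorLoop ls false := by
        simp only [handleErrorLoop, hT', Bool.false_eq_true, if_false, Bool.false_and]
      rw [hloop, ← ih]
      simp only [handleErrorCore, PySem.List.enumerate_cons, List.find?_cons, hT']
      rw [enum_find?_shift (fun p => PySem.Str.startswith p.2 "Traceback") ls 0
        (fun _ _ _ => rfl)]
      rcases hfind : (PySem.List.enumerate ls 0).find?
          (fun p => PySem.Str.startswith p.2 "Traceback") with _ | ⟨st, w⟩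
      · rw [hfind]
        simp
      · obtain ⟨k, hk1, hk2⟩ := enum_find?_mem hfind
        simp only at hk1 hk2
        rw [hfind]
        simp only [Option.map_some]
        have hslice1 : PySem.List.slice (l :: ls) (some (st + 1)) none = ls.drop k := by
          rw [hk1, show (0 : Int) + (k : Int) + 1 = ((k + 1 : Nat) : Int) by push_cast; ring,
            PySem.List.slice_from_natCast]
          simp
        have hslice2 : PySem.List.slice ls (some st) none = ls.drop k := by
          rw [hk1, show (0 : Int) + (k : Int) = ((k : Nat) : Int) by ring,
            PySem.List.slice_from_natCast]
        rw [hslice1, hslice2]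
        rw [enum_find?_shift
          (fun p => !PySem.Str.startswith p.2 " " && !PySem.Str.startswith p.2 "Traceback")
          (ls.drop k) st (fun _ _ _ => rfl)]
        rcases hfind2 : (PySem.List.enumerate (ls.drop k) st).find?
            (fun p => !PySem.Str.startswith p.2 " " && !PySem.Str.startswith p.2 "Traceback")
            with _ | ⟨e, v⟩
        · rw [hfind2]
          simp
        · obtain ⟨j, hj1, hj2⟩ := enum_find?_mem hfind2
          simp only at hj1 hj2
          rw [hfind2]
          simp only [Option.map_some]
          by_cases heq : e = st
          · rw [if_neg (by omega), if_neg (by omega)]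
          · rw [if_pos (by omega), if_pos heq]
            have hget : ls[k + j]? = some v := by
              rw [← List.getElem?_drop]; exact hj2
            rw [hj1, hk1]
            rw [show (0 : Int) + (k : Int) + (j : Int) + 1
                = ((k + j + 1 : Nat) : Int) by push_cast; ring]
            rw [show (0 : Int) + (k : Int) + (j : Int)
                = ((k + j : Nat) : Int) by push_cast; ring]
            simp only [PySem.List.pyGet?_natCast, List.getElem?_cons_succ, hget]

-- ===== VERDICT (by name: the statement is the Claim_ definition above) =====
theorem handle_error_spec : Claim_equal_handle_error := by
  intro stderr _
  unfold Spec_handle_error handle_error handle_error_alt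
  exact core_eq_loop (PySem.Str.splitlines stderr)
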